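-- pv_equiv track=rewrite | github.com/fedecalla/Funciones-Teoria-de-la-Informacion | codigos.py | decodifica_con_paridades
-- ===== SOURCE A (Python) =====
-- def decodifica_con_paridades(data):
--     # Valido longitud mínima
--     if len(data) < 2:
--         return ""
--
--     n = len(data) - 1
--     bytes_codificados = data[:-1]
--     pl = data[-1]
--
--     # Verifico paridad vertical (por fila)
--     for b in bytes_codificados:
--         bits_en_1 = bin(b >> 1).count('1')  # contar bits de los 7 bits ASCII
--         paridad_vertical = b & 1
--         total_1 = bits_en_1 + paridad_vertical
--         if total_1 % 2 != 0:
--             # Error de paridad vertical → no se puede corregir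
--             return ""
--
--     # Verifico paridad longitudinal (por columna)
--     for bit_pos in range(8):
--         unos = sum((b >> bit_pos) & 1 for b in bytes_codificados)
--         bit_pl = (pl >> bit_pos) & 1
--         total_1 = unos + bit_pl
--         if total_1 % 2 != 0:
--             # Error de paridad longitudinal → no se puede corregir
--             return ""
--
--     # Verifico paridad cruzada (bit 0 de PL)
--     bits_en_1 = bin(pl >> 1).count('1')
--     paridad_cruzada = pl & 1
--     total_1 = bits_en_1 + paridad_cruzada
--     if total_1 % 2 != 0:
--         # Error de paridad cruzada
--         return ""
--
--     # Si todo está bien, reconstruyo el mensaje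
--     mensaje = ""
--     for b in bytes_codificados:
--         codigo_ascii = b >> 1
--         mensaje += chr(codigo_ascii)
--
--     return mensaje
-- ===== SOURCE B (Python) =====
-- def decodifica_con_paridades(data):
--     if len(data) < 2:
--         return ""
--     body, pl = data[:-1], data[-1]
--     # every stored byte (and the longitudinal byte) must have even popcount
--     if any(bin(b).count('1') % 2 for b in body + [pl]):
--         return ""
--     # column-even parity across body+pl is exactly XOR == 0 on the low 8 bits
--     x = 0
--     for b in body:
--         x ^= b
--     if (x ^ pl) & 0xFF:
--         return ""
--     return ''.join(chr(b >> 1) for b in body)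
-- ===== Notes on version B (the rewrite author's own statement) =====
-- stated objective: simpler
-- what changed: The 8-iteration per-column double loop of the longitudinal check is replaced by a single XOR fold over the data bytes compared to the parity byte on the low 8 bits, the vertical and cross checks collapse into one even-popcount test over body+[pl], and the message is rebuilt with a join/map instead of string concatenation in a loop.
-- outside the precondition, e.g. on decodifica_con_paridades([225, -31]): A returns 'p', B returns ''; on decodifica_con_paridades([-1, 0]): A returns '', B returns ''; on decodifica_con_paridades([-1, -1]): A raises ValueError, B returns ''
import Mathlib
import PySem

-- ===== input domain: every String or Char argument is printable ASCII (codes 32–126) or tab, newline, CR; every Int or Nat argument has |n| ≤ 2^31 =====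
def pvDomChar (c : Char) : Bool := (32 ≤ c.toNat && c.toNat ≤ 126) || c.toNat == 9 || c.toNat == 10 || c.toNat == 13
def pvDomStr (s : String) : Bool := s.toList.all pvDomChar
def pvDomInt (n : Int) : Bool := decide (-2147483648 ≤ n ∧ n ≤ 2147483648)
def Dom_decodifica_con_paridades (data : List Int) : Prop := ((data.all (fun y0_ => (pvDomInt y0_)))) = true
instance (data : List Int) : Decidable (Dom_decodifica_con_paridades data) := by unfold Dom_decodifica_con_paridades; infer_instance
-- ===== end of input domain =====

-- B replaces the 8-column longitudinal double loop by one XOR fold checked against the parity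
-- byte's low 8 bits, merges the vertical and cross checks into a single even-popcount pass over
-- body+[pl], and rebuilds the message with a map instead of repeated concatenation (simpler, same cost).


-- ===== PORT A =====
-- chr(c) is ported by hand as Char.ofNat: exact for 0 ≤ c < 0xD800, which Pre_ guarantees
-- (every admitted entry b satisfies 0 ≤ b < 0x1B000, so b >> 1 < 0xD800).
def decodifica_con_paridades (data : List Int) : String :=
  if data.length < 2 then "" else
  let bytesCod := PySem.List.slice data none (some (-1))   -- data[:-1]
  let pl := PySem.List.pyGetD data (-1) 0                  -- data[-1] (in range: length ≥ 2)
  -- vertical parity loop: early return "" ⟺ some byte fails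
  if bytesCod.any (fun (b : Int) =>
      PySem.Int.mod ((PySem.Int.bitCount (b >>> (1 : Nat)) : Int) + PySem.Int.band b 1) 2 != 0)
  then "" else
  -- longitudinal parity loop over bit_pos in range(8)
  if (PySem.List.pyRange 0 8 1).any (fun bit_pos =>
      PySem.Int.mod ((bytesCod.map (fun (b : Int) => PySem.Int.band (b >>> bit_pos.toNat) 1)).sum
        + PySem.Int.band (pl >>> bit_pos.toNat) 1) 2 != 0)
  then "" else
  -- cross parity on pl
  if PySem.Int.mod ((PySem.Int.bitCount (pl >>> (1 : Nat)) : Int) + PySem.Int.band pl 1) 2 != 0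
  then "" else
  -- mensaje += chr(b >> 1)
  String.ofList (bytesCod.foldl (fun m (b : Int) => m ++ [Char.ofNat (b >>> (1 : Nat)).toNat]) [])

-- ===== PORT B =====
def decodifica_con_paridades_alt (data : List Int) : String :=
  if data.length < 2 then "" else
  let body := PySem.List.slice data none (some (-1))
  let pl := PySem.List.pyGetD data (-1) 0
  -- every stored byte (and the longitudinal byte) must have even popcount
  if (body ++ [pl]).any (fun (b : Int) => PySem.Int.bitCount b % 2 != 0) then "" else
  -- column-even parity across body+pl is exactly XOR == 0 on the low 8 bits
  let x := body.foldl (fun a b => PySem.Int.bxor a b) 0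
  if PySem.Int.band (PySem.Int.bxor x pl) 255 != 0 then "" else
  String.ofList (body.map (fun (b : Int) => Char.ofNat (b >>> (1 : Nat)).toNat))

-- ===== PRECONDITION & SPEC =====
-- Pre_ admits every list shorter than 2 and otherwise restricts to the natural domain of
-- nonnegative entries below 0x1B000 (a superset of the 8-bit values the matching encoder
-- produces): on negative entries Python's bin() reads the magnitude while & reads two's
-- complement, so A's and B's parity readings legitimately diverge (e.g. [225, -31]) or A
-- raises ValueError at chr; entries ≥ 0x1B000 reach chr codepoints (surrogates and beyond)
-- not representable as a Lean Char, so neither port can be faithful there.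
def Pre_decodifica_con_paridades (data : List Int) : Prop :=
  data.length < 2 ∨ ∀ b ∈ data, 0 ≤ b ∧ b < 110592
instance (data : List Int) : Decidable (Pre_decodifica_con_paridades data) := by
  unfold Pre_decodifica_con_paridades; infer_instance
def pvWitness_decodifica_con_paridades : List Int := [130, 130]

def Spec_decodifica_con_paridades (data : List Int) (out : String) : Prop := out = decodifica_con_paridades_alt data
instance (data : List Int) (out : String) : Decidable (Spec_decodifica_con_paridades data out) := by unfold Spec_decodifica_con_paridades; infer_instance

-- ===== CLAIM (what is proved, stated in full; the proofs are below) =====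
def Claim_equal_decodifica_con_paridades : Prop := ∀ (data : List Int), Dom_decodifica_con_paridades data → Pre_decodifica_con_paridades data → Spec_decodifica_con_paridades data (decodifica_con_paridades data)

-- ===== LEMMAS AND PROOFS =====
lemma intCast_shiftRight (m p : Nat) : ((m : Int) >>> p) = ((m >>> p : Nat) : Int) := rfl

lemma cast_bne_zero (x : Nat) : (((x : Int)) != 0) = (x != 0) := by
  rw [Bool.eq_iff_iff]; simp [bne_iff_ne]

lemma mod_natCast' (k : Nat) : PySem.Int.mod (k:Int) 2 = ((k % 2 : Nat) : Int) := by
  exact_mod_cast PySem.Int.mod_natCast k 2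

lemma shiftmod (m p : Nat) : (m >>> p) % 2 = (if m.testBit p then 1 else 0) := by
  simp only [Nat.testBit, Nat.one_and_eq_mod_two, bne_iff_ne, ne_eq, ite_not]
  split <;> omega

lemma vert_iff_pop (b : Int) (hb : 0 ≤ b) :
    (PySem.Int.mod ((PySem.Int.bitCount (b >>> (1 : Nat)) : Int) + PySem.Int.band b 1) 2 != 0)
      = (PySem.Int.bitCount b % 2 != 0) := by
  obtain ⟨m, rfl⟩ := Int.eq_ofNat_of_zero_le hb
  rw [intCast_shiftRight, Nat.shiftRight_one]
  rcases Nat.eq_zero_or_pos m with h0 | hpos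
  · subst h0; decide
  · rw [PySem.Int.bitCount_natCast hpos, PySem.Int.band_one, mod_natCast',
        ← Nat.cast_add, mod_natCast', cast_bne_zero, Bool.eq_iff_iff]
    simp only [bne_iff_ne, ne_eq]
    omega

lemma testBit_xorfold (l : List Nat) (a : Nat) (p : Nat) :
    (l.foldl (fun x b => x ^^^ b) a).testBit p
      = decide ((cond (a.testBit p) 1 0 + (l.map (fun b => b >>> p % 2)).sum) % 2 = 1) := by
  induction l generalizing a with
  | nil => cases h : a.testBit p <;> simp [h]
  | cons b l ih =>
    simp only [List.foldl_cons, List.map_cons, List.sum_cons, ih, Nat.testBit_xor, shiftmod]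
    cases ha : a.testBit p <;> cases hb : b.testBit p <;>
      simp only [Bool.xor_false, Bool.xor_true, Bool.not_false, Bool.not_true,
        cond_true, cond_false, if_true, if_false, Bool.false_eq_true] <;>
      exact decide_eq_decide.mpr (by omega)

lemma xorfold_natCast (l : List Int) (h : ∀ b ∈ l, 0 ≤ b) (a : Nat) :
    l.foldl (fun x b => PySem.Int.bxor x b) (a : Int)
      = ((l.foldl (fun x b => x ^^^ b.toNat) a : Nat) : Int) := by
  induction l generalizing a with
  | nil => rfl
  | cons b l ih =>
    obtain ⟨n, rfl⟩ := Int.eq_ofNat_of_zero_le (h b (by simp))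
    simp only [List.foldl_cons, PySem.Int.bxor_natCast, Int.toNat_natCast]
    exact ih (fun x hx => h x (by simp [hx])) _

lemma mod256_ne_zero_iff (n : Nat) :
    n % 256 ≠ 0 ↔ ∃ p, p < 8 ∧ n.testBit p := by
  constructor
  · intro h
    by_contra hc
    push Not at hc
    apply h
    apply Nat.eq_of_testBit_eq
    intro j
    have h8 := Nat.testBit_mod_two_pow n 8 j
    norm_num at h8
    rw [h8, Nat.zero_testBit]
    by_cases hj : j < 8
    · simp [hj, hc j hj]
    · simp [hj]
  · rintro ⟨p, hp, hbit⟩ h0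
    have h8 := Nat.testBit_mod_two_pow n 8 p
    norm_num at h8
    rw [h0, Nat.zero_testBit] at h8
    simp [hp, hbit] at h8

lemma colsum_natCast (body : List Int) (h : ∀ b ∈ body, 0 ≤ b) (p : Nat) :
    (body.map (fun (b : Int) => PySem.Int.band (b >>> p) 1)).sum
      = (((body.map (fun b => b.toNat >>> p % 2)).sum : Nat) : Int) := by
  induction body with
  | nil => rfl
  | cons b l ih =>
    obtain ⟨n, rfl⟩ := Int.eq_ofNat_of_zero_le (h b (by simp))
    simp only [List.map_cons, List.sum_cons, intCast_shiftRight, Int.toNat_natCast,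
      ih (fun x hx => h x (by simp [hx])), Nat.cast_add]
    congr 1
    rw [PySem.Int.band_one, mod_natCast']

lemma testBit_eq_decide (m p : Nat) : m.testBit p = decide (m >>> p % 2 = 1) := by
  have h := shiftmod m p
  cases hb : m.testBit p <;> simp [hb] at h ⊢

lemma long_iff_xor (body : List Int) (pl : Int) (hb : ∀ b ∈ body, 0 ≤ b) (hp : 0 ≤ pl) :
    ((PySem.List.pyRange 0 8 1).any (fun bit_pos =>
      PySem.Int.mod ((body.map (fun (b : Int) => PySem.Int.band (b >>> bit_pos.toNat) 1)).sum
        + PySem.Int.band (pl >>> bit_pos.toNat) 1) 2 != 0))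
    = (PySem.Int.band (PySem.Int.bxor (body.foldl (fun a b => PySem.Int.bxor a b) 0) pl) 255 != 0) := by
  obtain ⟨k, rfl⟩ := Int.eq_ofNat_of_zero_le hp
  -- the XOR fold as a Nat
  have hX : body.foldl (fun a b => PySem.Int.bxor a b) 0
      = (((body.map Int.toNat).foldl (fun x b => x ^^^ b) 0 : Nat) : Int) := by
    have h0 := xorfold_natCast body hb 0
    simpa [List.foldl_map] using h0
  set Xn : Nat := (body.map Int.toNat).foldl (fun x b => x ^^^ b) 0 with hXn
  rw [hX, PySem.Int.bxor_natCast, Bool.eq_iff_iff, List.any_eq_true]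
  have h255 : PySem.Int.band ((Xn ^^^ k : Nat) : Int) 255 = (((Xn ^^^ k) % 256 : Nat) : Int) := by
    have : (255 : Int) = ((255 : Nat) : Int) := rfl
    rw [this, PySem.Int.band_natCast]
    congr 1
    have h8 := Nat.and_two_pow_sub_one_eq_mod (Xn ^^^ k) 8
    norm_num at h8
    exact h8
  rw [h255, cast_bne_zero]
  -- per-column condition as Nat parity
  have hcol : ∀ p : Nat,
      (PySem.Int.mod ((body.map (fun (b : Int) => PySem.Int.band (b >>> p) 1)).sum
        + PySem.Int.band (((k:Int)) >>> p) 1) 2 != 0)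
      = decide (((body.map (fun b => b.toNat >>> p % 2)).sum + k >>> p % 2) % 2 = 1) := by
    intro p
    rw [colsum_natCast body hb p, intCast_shiftRight, PySem.Int.band_one, mod_natCast',
      ← Nat.cast_add, mod_natCast', cast_bne_zero, Bool.eq_iff_iff]
    simp only [bne_iff_ne, ne_eq, decide_eq_true_eq]
    omega
  -- bit p of Xn ^^^ k is that parity
  have hbit : ∀ p : Nat, (Xn ^^^ k).testBit p
      = decide (((body.map (fun b => b.toNat >>> p % 2)).sum + k >>> p % 2) % 2 = 1) := by
    intro p
    rw [Nat.testBit_xor, hXn, testBit_xorfold, List.map_map, testBit_eq_decide k p]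
    simp only [Nat.zero_testBit, cond_false, Nat.zero_add, Function.comp_def]
    rcases Nat.mod_two_eq_zero_or_one ((body.map (fun b => b.toNat >>> p % 2)).sum) with h1 | h1 <;>
      rcases Nat.mod_two_eq_zero_or_one (k >>> p) with h2 | h2 <;>
      simp [h1, h2, Bool.xor] <;> omega
  constructor
  · rintro ⟨x, hx, hcond⟩
    rw [PySem.List.mem_pyRange_one] at hx
    rw [bne_iff_ne, mod256_ne_zero_iff]
    refine ⟨x.toNat, by omega, ?_⟩
    rw [hbit]
    rw [hcol x.toNat] at hcond
    exact hcond
  · intro hne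
    rw [bne_iff_ne, mod256_ne_zero_iff] at hne
    obtain ⟨p, hp8, htb⟩ := hne
    refine ⟨(p : Int), by rw [PySem.List.mem_pyRange_one]; omega, ?_⟩
    rw [show ((p:Int)).toNat = p from Int.toNat_natCast p, hcol p]
    rw [hbit] at htb
    exact htb

lemma any_congr_mem {α : Type} (l : List α) (f g : α → Bool) (h : ∀ x ∈ l, f x = g x) :
    l.any f = l.any g := by
  rw [Bool.eq_iff_iff, List.any_eq_true, List.any_eq_true]
  exact ⟨fun ⟨x, hx, hf⟩ => ⟨x, hx, (h x hx) ▸ hf⟩, fun ⟨x, hx, hg⟩ => ⟨x, hx, (h x hx) ▸ hg⟩⟩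

-- ===== VERDICT (by name: the statement is the Claim_ definition above) =====
theorem decodifica_con_paridades_spec : Claim_equal_decodifica_con_paridades := by
  intro data _hdom hpre'
  unfold Spec_decodifica_con_paridades
  by_cases hlen : data.length < 2
  · simp [decodifica_con_paridades, decodifica_con_paridades_alt, hlen]
  · have hpre : ∀ b ∈ data, 0 ≤ b ∧ b < 110592 := hpre'.resolve_left hlen
    have hne : data ≠ [] := by intro h; subst h; simp at hlen
    have hb' : ∀ b ∈ data.dropLast, 0 ≤ b :=
      fun b h => (hpre b ((List.dropLast_sublist data).subset h)).1
    have hp' : 0 ≤ data.getLast hne := (hpre _ (List.getLast_mem hne)).1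
    simp only [decodifica_con_paridades, decodifica_con_paridades_alt, if_neg hlen,
      PySem.List.slice_to_neg_one, PySem.List.pyGetD_neg_one data 0 hne]
    rw [any_congr_mem _ _ _ (fun x hx => vert_iff_pop x (hb' x hx))]
    rw [long_iff_xor data.dropLast _ hb' hp']
    rw [vert_iff_pop _ hp']
    rw [show (data.dropLast.foldl (fun m (b : Int) => m ++ [Char.ofNat (b >>> (1 : Nat)).toNat]) [])
        = data.dropLast.map (fun (b : Int) => Char.ofNat (b >>> (1 : Nat)).toNat) from by
      simpa using PySem.List.foldl_append_singleton_eq_map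
        (fun (b : Int) => Char.ofNat (b >>> (1 : Nat)).toNat) data.dropLast []]
    simp only [List.any_append, List.any_cons, List.any_nil, Bool.or_false]
    by_cases hv : data.dropLast.any (fun b => PySem.Int.bitCount b % 2 != 0) = true <;>
      by_cases hl : (PySem.Int.band (PySem.Int.bxor
          (data.dropLast.foldl (fun a b => PySem.Int.bxor a b) 0) (data.getLast hne)) 255 != 0) = true <;>
      by_cases hc : (PySem.Int.bitCount (data.getLast hne) % 2 != 0) = true <;>
      simp [hv, hl, hc]
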